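-- pv_equiv track=rewrite | github.com/ldemon2333/lanqiaopython | day18/【学长带练】串的前缀.py | min_fix
-- ===== SOURCE A (Python) =====
-- def max_fix(s):
--     max_same = [0] * len(s)
--
--     for i in range(1, len(s)):
--         j = i - 1
--
--         while j >= 0:
--             pi = max_same[j]
--
--             if s[i] == s[pi]:
--                 max_same[i] = pi + 1
--                 break
--
--             j = pi - 1
--
--     return max_same
--
-- def min_fix(s):
--     min_same = max_fix(s)
--
--     for i in range(1, len(s)):
--         j = i                       # initial j as i > 0
--
--         while pi := min_same[j]:    # ensure j and pi > 0
--             min_same[i] = pi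
--             j = pi - 1              # worst j is 0
--
--     return min_same
-- ===== SOURCE B (Python) =====
-- def min_fix(s):
--     # One pass: standard KMP failure function with carried k, plus the DP
--     # recurrence res[i] = res[k-1] or k (smallest nonzero border), no chain walking.
--     n = len(s)
--     f = [0] * n
--     res = [0] * n
--     k = 0
--     for i in range(1, n):
--         while k > 0 and s[i] != s[k]:
--             k = f[k - 1]
--         if s[i] == s[k]:
--             k += 1
--         f[i] = k
--         if k:
--             res[i] = res[k - 1] or k
--     return res
-- ===== Notes on version B (the rewrite author's own statement) =====
-- stated objective: alternative
-- what changed: Replaces A's two passes (a failure-function pass that restarts j=i-1 each iteration, then a second in-place pass walking the border chain per position) by one pass computing the standard KMP failure function with a carried k and the direct DP recurrence res[i] = res[k-1] or k.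
import Mathlib
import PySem

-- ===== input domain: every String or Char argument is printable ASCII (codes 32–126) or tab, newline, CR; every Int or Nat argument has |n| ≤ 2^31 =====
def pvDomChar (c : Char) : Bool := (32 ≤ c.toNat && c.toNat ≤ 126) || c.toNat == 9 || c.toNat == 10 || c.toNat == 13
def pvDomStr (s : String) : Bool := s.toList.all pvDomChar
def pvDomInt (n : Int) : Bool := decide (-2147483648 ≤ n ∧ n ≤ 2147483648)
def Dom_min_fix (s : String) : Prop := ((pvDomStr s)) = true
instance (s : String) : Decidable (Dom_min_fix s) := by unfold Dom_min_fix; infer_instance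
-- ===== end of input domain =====

-- B replaces A's two passes (failure-function pass restarting j = i-1 each step, then an
-- in-place border-chain-walking pass) by one pass: the standard KMP failure function with a
-- carried k plus the direct recurrence res[i] = res[k-1] or k; same cost class (alternative).

-- ===== PORT A =====
-- inner `while j >= 0` loop of max_fix; the fuel i+1 passed below over-approximates the
-- iteration count (each step strictly decreases j, proved in the lemmas), so it never runs out
def aChase (cs : List Char) (i : Nat) : Nat → List Int → Int → List Int
  | 0, ms, _ => ms
  | fuel + 1, ms, j =>
    if 0 ≤ j then
      let pi := PySem.List.pyGetD ms j 0
      if PySem.List.pyGetD cs (i : Int) ' ' = PySem.List.pyGetD cs pi ' ' then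
        PySem.List.pySetD ms (i : Int) (pi + 1)
      else aChase cs i fuel ms (pi - 1)
    else ms

-- helper max_fix of A
def maxFixA (s : String) : List Int :=
  (List.range' 1 (s.toList.length - 1)).foldl
    (fun ms i => aChase s.toList i (i + 1) ms ((i : Int) - 1))
    (List.replicate s.toList.length 0)

-- inner `while pi := min_same[j]` loop of A's min_fix (reads, writes slot i, descends)
def aMinChase (i : Nat) : Nat → List Int → Int → List Int
  | 0, ms, _ => ms
  | fuel + 1, ms, j =>
    let pi := PySem.List.pyGetD ms j 0
    if pi ≠ 0 then aMinChase i fuel (PySem.List.pySetD ms (i : Int) pi) (pi - 1) else ms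

def min_fix (s : String) : List Int :=
  (List.range' 1 (s.toList.length - 1)).foldl
    (fun ms i => aMinChase i (i + 1) ms (i : Int))
    (maxFixA s)

-- ===== PORT B =====
-- `while k > 0 and s[i] != s[k]: k = f[k-1]`; fuel k+1 over-approximates (k strictly decreases)
def bChase (cs : List Char) (i : Nat) (f : List Int) : Nat → Int → Int
  | 0, k => k
  | fuel + 1, k =>
    if 0 < k ∧ ¬ PySem.List.pyGetD cs (i : Int) ' ' = PySem.List.pyGetD cs k ' ' then
      bChase cs i f fuel (PySem.List.pyGetD f (k - 1) 0)
    else k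

-- one iteration of B's single loop over the state (f, res, k)
def bStep (cs : List Char) (st : List Int × List Int × Int) (i : Nat) : List Int × List Int × Int :=
  let k0 := bChase cs i st.1 (st.2.2.toNat + 1) st.2.2
  let k := if PySem.List.pyGetD cs (i : Int) ' ' = PySem.List.pyGetD cs k0 ' ' then k0 + 1 else k0
  let f := PySem.List.pySetD st.1 (i : Int) k
  let res :=
    if k ≠ 0 then
      PySem.List.pySetD st.2.1 (i : Int)
        (if PySem.List.pyGetD st.2.1 (k - 1) 0 ≠ 0 then PySem.List.pyGetD st.2.1 (k - 1) 0 else k)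
    else st.2.1
  (f, res, k)

def min_fix_alt (s : String) : List Int :=
  ((List.range' 1 (s.toList.length - 1)).foldl (bStep s.toList)
    (List.replicate s.toList.length 0, List.replicate s.toList.length 0, 0)).2.1

-- ===== PRECONDITION & SPEC =====
def Spec_min_fix (s : String) (out : List Int) : Prop := out = min_fix_alt s
instance (s : String) (out : List Int) : Decidable (Spec_min_fix s out) := by unfold Spec_min_fix; infer_instance

-- ===== CLAIM (what is proved, stated in full; the proofs are below) =====
def Claim_equal_min_fix : Prop := ∀ (s : String), Dom_min_fix s → Spec_min_fix s (min_fix s)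

-- ===== LEMMAS AND PROOFS =====

theorem pyGetD_toNat {α : Type} (xs : List α) {i : Int} (d : α) (h : 0 ≤ i) :
    PySem.List.pyGetD xs i d = xs.getD i.toNat d := by
  simp [PySem.List.pyGetD, PySem.List.pyGet?_of_nonneg xs h, List.getD]

theorem getD_set_eq (xs : List Int) (n m : Nat) (v : Int) :
    (xs.set n v).getD m 0 = if n = m ∧ n < xs.length then v else xs.getD m 0 := by
  rcases Nat.lt_or_ge m xs.length with h | h
  · by_cases hn : n = m <;> simp [List.getD_eq_getElem?_getD, hn, h]
  · by_cases hn : n = m <;>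
      simp_all [List.getD_eq_getElem?_getD]

theorem set_of_getD_zero (xs : List Int) (n : Nat) (h : n < xs.length) (hx : xs.getD n 0 = 0) :
    xs.set n 0 = xs := by
  apply List.ext_getElem (by simp)
  intro i h1 h2
  simp only [List.getElem_set]
  split
  · next he => subst he; rw [List.getD_eq_getElem _ _ h] at hx; omega
  · rfl

theorem getD_set_lt (xs : List Int) (n : Nat) (h : n < xs.length) (t : Nat) (v : Int) :
    (xs.set n v).getD t 0 = if t = n then v else xs.getD t 0 := by
  rw [getD_set_eq]
  by_cases h' : t = n
  · subst h'; simp [h]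
  · rw [if_neg (by tauto), if_neg h']

theorem getD_replicate0 (n t : Nat) : (List.replicate n (0 : Int)).getD t 0 = 0 := by
  rcases Nat.lt_or_ge t n with h | h <;>
    simp [List.getD_eq_getElem?_getD, h]

-- B's post-while value of k at position i (the while loop, then the possible k += 1)
def bPost (cs : List Char) (i : Nat) (F : List Int) (fb : Nat) (k : Int) : Int :=
  let k' := bChase cs i F fb k
  if PySem.List.pyGetD cs (i : Int) ' ' = PySem.List.pyGetD cs k' ' ' then k' + 1 else k'

theorem bChase_bounds (cs : List Char) (i : Nat) (F : List Int) (m : Nat)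
    (hF : ∀ t : Nat, t ≤ m → 0 ≤ F.getD t 0 ∧ F.getD t 0 ≤ (t : Int)) :
    ∀ (fuel : Nat) (k : Int), 0 ≤ k → k ≤ (m : Int) + 1 →
      0 ≤ bChase cs i F fuel k ∧ bChase cs i F fuel k ≤ k := by
  intro fuel
  induction fuel with
  | zero => intro k h0 _; exact ⟨h0, le_refl k⟩
  | succ fuel ih =>
    intro k h0 h1
    simp only [bChase]
    split
    · next hc =>
      have hk1 : (0 : Int) ≤ k - 1 := by omega
      rw [pyGetD_toNat F 0 hk1]
      have hle : (k - 1).toNat ≤ m := by omega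
      have hb := hF (k - 1).toNat hle
      have := ih (F.getD (k - 1).toNat 0) hb.1 (by omega)
      exact ⟨this.1, by omega⟩
    · exact ⟨h0, le_refl k⟩

-- the crux: A's inner descent (walking j) equals writing B's post-while value into slot i
theorem inner_eq (cs : List Char) (i : Nat) (F : List Int)
    (hi : i < F.length) (hFi : F.getD i 0 = 0)
    (hF : ∀ t : Nat, t < i → 0 ≤ F.getD t 0 ∧ F.getD t 0 ≤ (t : Int)) :
    ∀ (jn : Nat), jn < i → ∀ (fa fb : Nat) (k : Int), F.getD jn 0 = k →
      jn + 2 ≤ fa → k.toNat + 1 ≤ fb →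
      aChase cs i fa F (jn : Int) = F.set i (bPost cs i F fb k) := by
  intro jn
  induction jn using Nat.strong_induction_on with
  | _ jn IH =>
    intro hji fa fb k hk hfa hfb
    obtain ⟨fa', rfl⟩ : ∃ fa', fa = fa' + 1 := ⟨fa - 1, by omega⟩
    obtain ⟨fb', rfl⟩ : ∃ fb', fb = fb' + 1 := ⟨fb - 1, by omega⟩
    have hkb := hF jn hji
    rw [hk] at hkb
    have hstepA : aChase cs i (fa' + 1) F (jn : Int) =
        (if PySem.List.pyGetD cs (i : Int) ' ' = PySem.List.pyGetD cs k ' ' then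
          PySem.List.pySetD F (i : Int) (k + 1)
        else aChase cs i fa' F (k - 1)) := by
      simp only [aChase]
      rw [if_pos (by omega : (0 : Int) ≤ (jn : Int)), pyGetD_toNat F 0 (by omega),
        Int.toNat_natCast, hk]
    rw [hstepA]
    by_cases hmatch : PySem.List.pyGetD cs (i : Int) ' ' = PySem.List.pyGetD cs k ' '
    · have hbc : bChase cs i F (fb' + 1) k = k := by
        simp only [bChase]; rw [if_neg (by tauto)]
      rw [if_pos hmatch, PySem.List.pySetD_of_nonneg F _ (by omega : (0 : Int) ≤ (i : Int)),
        Int.toNat_natCast]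
      simp only [bPost, hbc]
      rw [if_pos hmatch]
    · by_cases hk0 : k = 0
      · subst hk0
        have hbc : bChase cs i F (fb' + 1) 0 = 0 := by
          simp only [bChase]; rw [if_neg (by simp)]
        rw [if_neg hmatch]
        have hA : aChase cs i fa' F (0 - 1) = F := by
          obtain ⟨fa'', rfl⟩ : ∃ fa'', fa' = fa'' + 1 := ⟨fa' - 1, by omega⟩
          simp only [aChase]; rw [if_neg (by omega)]
        rw [hA]
        simp only [bPost, hbc]
        rw [if_neg hmatch, set_of_getD_zero F i hi hFi]
      · have hkpos : 0 < k := by omega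
        have htn : (k - 1).toNat = k.toNat - 1 := by omega
        have hknew : PySem.List.pyGetD F (k - 1) 0 = F.getD (k.toNat - 1) 0 := by
          rw [pyGetD_toNat F 0 (by omega), htn]
        have hbc : bChase cs i F (fb' + 1) k
            = bChase cs i F fb' (F.getD (k.toNat - 1) 0) := by
          simp only [bChase]
          rw [if_pos ⟨hkpos, hmatch⟩, hknew]
        have hbp : bPost cs i F (fb' + 1) k = bPost cs i F fb' (F.getD (k.toNat - 1) 0) := by
          simp only [bPost]; rw [hbc]
        rw [if_neg hmatch, hbp]
        have hcast : ((k.toNat - 1 : Nat) : Int) = k - 1 := by omega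
        rw [← hcast]
        exact IH (k.toNat - 1) (by omega) (by omega) fa' fb' _ rfl (by omega)
          (by have h2 := hF (k.toNat - 1) (by omega); omega)

-- invariant carried through B's single pass (state after outer indices 1..m)
def PVInv (n : Nat) (F R : List Int) (k : Int) (m : Nat) : Prop :=
  F.length = n ∧ R.length = n ∧
  k = F.getD m 0 ∧
  (∀ t : Nat, m < t → F.getD t 0 = 0 ∧ R.getD t 0 = 0) ∧
  (∀ t : Nat, t ≤ m → 0 ≤ F.getD t 0 ∧ F.getD t 0 ≤ (t : Int)) ∧
  (∀ t : Nat, t ≤ m → 0 ≤ R.getD t 0 ∧ R.getD t 0 ≤ F.getD t 0) ∧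
  (∀ t : Nat, t ≤ m → R.getD t 0 ≠ 0 → R.getD ((R.getD t 0).toNat - 1) 0 = 0) ∧
  (∀ t : Nat, 1 ≤ t → t ≤ m →
    (F.getD t 0 = 0 → R.getD t 0 = 0) ∧
    (F.getD t 0 ≠ 0 → R.getD t 0 =
      if R.getD ((F.getD t 0).toNat - 1) 0 ≠ 0 then R.getD ((F.getD t 0).toNat - 1) 0
      else F.getD t 0))

theorem bStep_inv (cs : List Char) (F R : List Int) (k : Int) (m : Nat)
    (hm : m + 1 < cs.length) (hInv : PVInv cs.length F R k m) :
    (bStep cs (F, R, k) (m + 1)).1 = F.set (m + 1) (bPost cs (m + 1) F (k.toNat + 1) k) ∧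
    PVInv cs.length (bStep cs (F, R, k) (m + 1)).1 (bStep cs (F, R, k) (m + 1)).2.1
      (bStep cs (F, R, k) (m + 1)).2.2 (m + 1) := by
  obtain ⟨hFlen, hRlen, hkF, hUn, hFb, hRb, hch, hrec⟩ := hInv
  set i := m + 1 with hidef
  have hilen : i < F.length := by omega
  have hirlen : i < R.length := by omega
  set kv := bPost cs i F (k.toNat + 1) k with hkv
  have hB1 : (bStep cs (F, R, k) i).1 = PySem.List.pySetD F (i : Int) kv := rfl
  have hB2 : (bStep cs (F, R, k) i).2.2 = kv := rfl
  have hBr : (bStep cs (F, R, k) i).2.1 =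
      if kv ≠ 0 then
        PySem.List.pySetD R (i : Int)
          (if PySem.List.pyGetD R (kv - 1) 0 ≠ 0 then PySem.List.pyGetD R (kv - 1) 0 else kv)
      else R := rfl
  have h0k : 0 ≤ k := by rw [hkF]; exact (hFb m le_rfl).1
  have hkm : k ≤ (m : Int) := by rw [hkF]; exact (hFb m le_rfl).2
  have hb := bChase_bounds cs i F m hFb (k.toNat + 1) k h0k (by omega)
  have hkv0 : 0 ≤ kv := by rw [hkv]; simp only [bPost]; split <;> omega
  have hkvi : kv ≤ (i : Int) := by rw [hkv]; simp only [bPost]; split <;> omega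
  rw [PySem.List.pySetD_of_nonneg F kv (by omega), Int.toNat_natCast] at hB1
  have hFget : ∀ t : Nat, (bStep cs (F, R, k) i).1.getD t 0
      = if t = i then kv else F.getD t 0 := by
    intro t; rw [hB1, getD_set_lt F i hilen t kv]
  have hFilen : (bStep cs (F, R, k) i).1.length = cs.length := by
    rw [hB1]; simp [hFlen]
  by_cases hkvz : kv = 0
  · -- kv = 0 : res untouched at i
    have hBr0 : (bStep cs (F, R, k) i).2.1 = R := by rw [hBr, if_neg (by omega)]
    refine ⟨hB1, hFilen, by rw [hBr0]; exact hRlen,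
      by rw [hB2, hFget i]; simp, ?_, ?_, ?_, ?_, ?_⟩
    · intro t ht
      rw [hFget t, hBr0, if_neg (by omega)]
      exact hUn t (by omega)
    · intro t ht
      by_cases hti : t = i
      · subst hti; rw [hFget i, if_pos rfl]; omega
      · rw [hFget t, if_neg hti]; exact hFb t (by omega)
    · intro t ht
      rw [hBr0]
      by_cases hti : t = i
      · subst hti
        rw [hFget i, if_pos rfl, (hUn i (by omega)).2]
        omega
      · rw [hFget t, if_neg hti]; exact hRb t (by omega)
    · intro t ht hne
      rw [hBr0] at hne ⊢
      by_cases hti : t = i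
      · subst hti; exact absurd (hUn i (by omega)).2 hne
      · exact hch t (by omega) hne
    · intro t h1t ht
      rw [hBr0]
      by_cases hti : t = i
      · subst hti
        rw [hFget i, if_pos rfl]
        exact ⟨fun _ => (hUn i (by omega)).2, fun h => absurd hkvz h⟩
      · rw [hFget t, if_neg hti]
        exact hrec t h1t (by omega)
  · -- kv ≠ 0 : res gets v at slot i
    have hkv1 : 1 ≤ kv := by omega
    set tv := kv.toNat - 1 with htvdef
    have htv : tv ≤ m := by omega
    have htvi : tv < i := by omega
    have hRtvle : R.getD tv 0 ≤ (tv : Int) := by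
      have h1 := (hRb tv htv).2
      have h2 := (hFb tv htv).2
      omega
    have hRtv0 : 0 ≤ R.getD tv 0 := (hRb tv htv).1
    have hRget : PySem.List.pyGetD R (kv - 1) 0 = R.getD tv 0 := by
      rw [pyGetD_toNat R 0 (by omega)]
      have h : (kv - 1).toNat = tv := by omega
      rw [h]
    set v := if R.getD tv 0 ≠ 0 then R.getD tv 0 else kv with hv
    have hBr1 : (bStep cs (F, R, k) i).2.1 = R.set i v := by
      rw [hBr, if_pos hkvz, hRget, PySem.List.pySetD_of_nonneg R _ (by omega), Int.toNat_natCast]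
    have hRget' : ∀ t : Nat, (bStep cs (F, R, k) i).2.1.getD t 0
        = if t = i then v else R.getD t 0 := by
      intro t; rw [hBr1, getD_set_lt R i hirlen t v]
    have hv0 : 0 ≤ v := by rw [hv]; split <;> omega
    have hvkv : v ≤ kv := by rw [hv]; split <;> omega
    refine ⟨hB1, hFilen, by rw [hBr1]; simp [hRlen],
      by rw [hB2, hFget i]; simp, ?_, ?_, ?_, ?_, ?_⟩
    · intro t ht
      rw [hFget t, if_neg (by omega), hRget' t, if_neg (by omega)]
      exact hUn t (by omega)
    · intro t ht
      by_cases hti : t = i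
      · subst hti; rw [hFget i, if_pos rfl]; omega
      · rw [hFget t, if_neg hti]; exact hFb t (by omega)
    · intro t ht
      by_cases hti : t = i
      · subst hti; rw [hFget i, if_pos rfl, hRget' i, if_pos rfl]; exact ⟨hv0, hvkv⟩
      · rw [hFget t, if_neg hti, hRget' t, if_neg hti]; exact hRb t (by omega)
    · intro t ht hne
      by_cases hti : t = i
      · subst hti
        rw [hRget' i, if_pos rfl] at hne ⊢
        rw [hRget' (v.toNat - 1), if_neg (by omega)]
        by_cases hrt : R.getD tv 0 ≠ 0
        · have hveq : v = R.getD tv 0 := by rw [hv, if_pos hrt]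
          rw [hveq]
          exact hch tv (by omega) hrt
        · have hveq : v = kv := by rw [hv, if_neg hrt]
          rw [hveq]
          have h : kv.toNat - 1 = tv := by omega
          rw [h]
          omega
      · rw [hRget' t, if_neg hti] at hne ⊢
        have hrle : R.getD t 0 ≤ (t : Int) := by
          have h1 := (hRb t (by omega)).2
          have h2 := (hFb t (by omega)).2
          omega
        rw [hRget' ((R.getD t 0).toNat - 1), if_neg (by omega)]
        exact hch t (by omega) hne
    · intro t h1t ht
      by_cases hti : t = i
      · subst hti
        rw [hFget i, if_pos rfl, hRget' i, if_pos rfl]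
        refine ⟨fun h => absurd h hkvz, fun _ => ?_⟩
        have hinner : (bStep cs (F, R, k) i).2.1.getD (kv.toNat - 1) 0 = R.getD tv 0 := by
          rw [hRget' (kv.toNat - 1), if_neg (by omega)]
        rw [hinner]
      · have hfle : F.getD t 0 ≤ (t : Int) := (hFb t (by omega)).2
        have hf0 : 0 ≤ F.getD t 0 := (hFb t (by omega)).1
        have hinner : (bStep cs (F, R, k) i).2.1.getD ((F.getD t 0).toNat - 1) 0
            = R.getD ((F.getD t 0).toNat - 1) 0 := by
          rw [hRget' ((F.getD t 0).toNat - 1), if_neg (by omega)]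
        rw [hFget t, if_neg hti, hRget' t, if_neg hti, hinner]
        exact hrec t h1t (by omega)

theorem stage1 (cs : List Char) :
    ∀ m : Nat, m < cs.length →
      ((List.range' 1 m).foldl (fun ms i => aChase cs i (i + 1) ms ((i : Int) - 1))
          (List.replicate cs.length 0)
        = ((List.range' 1 m).foldl (bStep cs)
            (List.replicate cs.length 0, List.replicate cs.length 0, 0)).1)
      ∧ PVInv cs.length
          ((List.range' 1 m).foldl (bStep cs)
            (List.replicate cs.length 0, List.replicate cs.length 0, 0)).1
          ((List.range' 1 m).foldl (bStep cs)
            (List.replicate cs.length 0, List.replicate cs.length 0, 0)).2.1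
          ((List.range' 1 m).foldl (bStep cs)
            (List.replicate cs.length 0, List.replicate cs.length 0, 0)).2.2 m := by
  intro m
  induction m with
  | zero =>
    intro _
    refine ⟨rfl, by simp, by simp, (getD_replicate0 _ 0).symm, ?_, ?_, ?_, ?_, ?_⟩
    · intro t _
      exact ⟨getD_replicate0 _ t, getD_replicate0 _ t⟩
    · intro t ht
      simp only [List.range'_zero, List.foldl_nil, getD_replicate0]
      omega
    · intro t ht
      simp only [List.range'_zero, List.foldl_nil, getD_replicate0]
      omega
    · intro t _ h
      exact absurd (getD_replicate0 _ t) h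
    · intro t h1 h2
      omega
  | succ m ih =>
    intro hm
    obtain ⟨hAB, hInv⟩ := ih (by omega)
    have hr : List.range' 1 (m + 1) = List.range' 1 m ++ [m + 1] := by
      have h : 1 + m = m + 1 := by omega
      rw [List.range'_1_concat, h]
    rw [hr, List.foldl_append, List.foldl_append]
    simp only [List.foldl_cons, List.foldl_nil]
    set st := (List.range' 1 m).foldl (bStep cs)
      (List.replicate cs.length 0, List.replicate cs.length 0, 0) with hst
    have hstep := bStep_inv cs st.1 st.2.1 st.2.2 m hm hInv
    have hcast : ((m + 1 : Nat) : Int) - 1 = ((m : Nat) : Int) := by push_cast; ring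
    have hA : aChase cs (m + 1) (m + 1 + 1) st.1 (((m + 1 : Nat) : Int) - 1)
        = st.1.set (m + 1) (bPost cs (m + 1) st.1 (st.2.2.toNat + 1) st.2.2) := by
      rw [hcast]
      obtain ⟨hFlen, hRlen, hkF, hUn, hFb, hRb, hch, hrec⟩ := hInv
      exact inner_eq cs (m + 1) st.1 (by omega) ((hUn (m + 1) (by omega)).1)
        (fun t ht => hFb t (by omega)) m (by omega) (m + 1 + 1) (st.2.2.toNat + 1)
        st.2.2 hkF.symm (by omega) (by omega)
    constructor
    · rw [hAB, hA]
      exact hstep.1.symm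
    · exact hstep.2

theorem stage2 (n : Nat) (F R : List Int)
    (hFlen : F.length = n) (hRlen : R.length = n)
    (hFb : ∀ t : Nat, 0 ≤ F.getD t 0 ∧ F.getD t 0 ≤ (t : Int))
    (hRb : ∀ t : Nat, 0 ≤ R.getD t 0 ∧ R.getD t 0 ≤ F.getD t 0)
    (hchain : ∀ t : Nat, R.getD t 0 ≠ 0 → R.getD ((R.getD t 0).toNat - 1) 0 = 0)
    (hrec : ∀ t : Nat, 1 ≤ t → t < n →
      (F.getD t 0 = 0 → R.getD t 0 = 0) ∧
      (F.getD t 0 ≠ 0 → R.getD t 0 =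
        if R.getD ((F.getD t 0).toNat - 1) 0 ≠ 0 then R.getD ((F.getD t 0).toNat - 1) 0
        else F.getD t 0)) :
    ∀ m : Nat, m < n →
      ((List.range' 1 m).foldl (fun ms i => aMinChase i (i + 1) ms (i : Int)) F).length = n ∧
      ∀ t : Nat, ((List.range' 1 m).foldl (fun ms i => aMinChase i (i + 1) ms (i : Int)) F).getD t 0
        = if t ≤ m then R.getD t 0 else F.getD t 0 := by
  intro m
  induction m with
  | zero =>
    intro _
    simp only [List.range'_zero, List.foldl_nil]
    refine ⟨hFlen, ?_⟩
    intro t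
    by_cases ht : t ≤ 0
    · have ht0 : t = 0 := by omega
      subst ht0
      rw [if_pos le_rfl]
      have h1 := hFb 0
      have h2 := hRb 0
      omega
    · rw [if_neg ht]
  | succ m ih =>
    intro hm
    obtain ⟨ihl, ihp⟩ := ih (by omega)
    have hr : List.range' 1 (m + 1) = List.range' 1 m ++ [m + 1] := by
      have h : 1 + m = m + 1 := by omega
      rw [List.range'_1_concat, h]
    rw [hr, List.foldl_append]
    simp only [List.foldl_cons, List.foldl_nil]
    set X := (List.range' 1 m).foldl (fun ms i => aMinChase i (i + 1) ms (i : Int)) F with hX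
    have hXi : X.getD (m + 1) 0 = F.getD (m + 1) 0 := by rw [ihp (m + 1), if_neg (by omega)]
    set kv := F.getD (m + 1) 0 with hkvdef
    have hkvb := hFb (m + 1)
    rw [← hkvdef] at hkvb
    have hstep1 : aMinChase (m + 1) (m + 1 + 1) X ((m + 1 : Nat) : Int)
        = if kv ≠ 0 then aMinChase (m + 1) (m + 1) (X.set (m + 1) kv) (kv - 1) else X := by
      simp only [aMinChase]
      rw [pyGetD_toNat X 0 (by omega), Int.toNat_natCast, hXi,
        PySem.List.pySetD_of_nonneg X _ (by omega), Int.toNat_natCast]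
    by_cases hkz : kv = 0
    · rw [hstep1, if_neg (by omega)]
      refine ⟨ihl, ?_⟩
      intro t
      by_cases htm : t ≤ m + 1
      · rw [if_pos htm]
        by_cases htm' : t ≤ m
        · rw [ihp t, if_pos htm']
        · have ht1 : t = m + 1 := by omega
          subst ht1
          rw [hXi]
          have hr0 := (hrec (m + 1) (by omega) (by omega)).1 hkz
          omega
      · rw [if_neg htm, ihp t, if_neg (by omega)]
    · have hXlen : (m + 1) < X.length := by omega
      set X1 := X.set (m + 1) kv with hX1
      have hX1len : X1.length = n := by rw [hX1]; simp [ihl]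
      have hX1get : ∀ t : Nat, X1.getD t 0 = if t = m + 1 then kv else X.getD t 0 :=
        fun t => getD_set_lt X (m + 1) hXlen t kv
      set mv := R.getD (kv.toNat - 1) 0 with hmvdef
      have hmvb := hRb (kv.toNat - 1)
      have hmvf := hFb (kv.toNat - 1)
      rw [← hmvdef] at hmvb
      have hpi2 : X1.getD (kv.toNat - 1) 0 = mv := by
        rw [hX1get (kv.toNat - 1), if_neg (by omega), ihp (kv.toNat - 1), if_pos (by omega)]
      have hstep2 : aMinChase (m + 1) (m + 1) X1 (kv - 1)
          = if mv ≠ 0 then aMinChase (m + 1) m (X1.set (m + 1) mv) (mv - 1) else X1 := by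
        simp only [aMinChase]
        have h : (kv - 1).toNat = kv.toNat - 1 := by omega
        rw [pyGetD_toNat X1 0 (by omega), h, hpi2,
          PySem.List.pySetD_of_nonneg X1 _ (by omega), Int.toNat_natCast]
      have hreci := (hrec (m + 1) (by omega) (by omega)).2 hkz
      rw [← hkvdef, ← hmvdef] at hreci
      by_cases hmz : mv = 0
      · rw [hstep1, if_pos hkz, hstep2, if_neg (by omega)]
        refine ⟨hX1len, ?_⟩
        intro t
        by_cases htm : t ≤ m + 1
        · rw [if_pos htm, hX1get t]
          by_cases hti : t = m + 1
          · subst hti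
            rw [if_pos rfl, hreci, if_neg (by omega)]
          · rw [if_neg hti, ihp t, if_pos (by omega)]
        · rw [if_neg htm, hX1get t, if_neg (by omega), ihp t, if_neg (by omega)]
      · have hmv1 : 1 ≤ mv := by omega
        have hmvle : mv ≤ (kv.toNat - 1 : Nat) := by
          have := hmvf.2
          omega
        obtain ⟨m2, hm2⟩ : ∃ m2, m = m2 + 1 := ⟨m - 1, by omega⟩
        have hX1len' : (m + 1) < X1.length := by omega
        set X2 := X1.set (m + 1) mv with hX2
        have hX2len : X2.length = n := by rw [hX2]; simp [hX1len]
        have hX2get : ∀ t : Nat, X2.getD t 0 = if t = m + 1 then mv else X.getD t 0 := by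
          intro t
          rw [hX2, getD_set_lt X1 (m + 1) hX1len' t mv, hX1get t]
          by_cases hti : t = m + 1 <;> simp [hti]
        have hc0 : R.getD (mv.toNat - 1) 0 = 0 := by
          have := hchain (kv.toNat - 1) (by rw [← hmvdef]; omega)
          rw [← hmvdef] at this
          exact this
        have hpi3 : X2.getD (mv.toNat - 1) 0 = 0 := by
          rw [hX2get (mv.toNat - 1), if_neg (by omega), ihp (mv.toNat - 1), if_pos (by omega)]
          exact hc0
        have hstep3 : aMinChase (m + 1) m X2 (mv - 1) = X2 := by
          rw [hm2]
          simp only [aMinChase]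
          have h : (mv - 1).toNat = mv.toNat - 1 := by omega
          rw [pyGetD_toNat X2 0 (by omega), h, hpi3, if_neg (by omega)]
        rw [hstep1, if_pos hkz, hstep2, if_pos hmz, hstep3]
        refine ⟨hX2len, ?_⟩
        intro t
        by_cases htm : t ≤ m + 1
        · rw [if_pos htm, hX2get t]
          by_cases hti : t = m + 1
          · subst hti
            rw [if_pos rfl, hreci, if_pos (by omega)]
          · rw [if_neg hti, ihp t, if_pos (by omega)]
        · rw [if_neg htm, hX2get t, if_neg (by omega), ihp t, if_neg (by omega)]

-- ===== VERDICT (by name: the statement is the Claim_ definition above) =====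
theorem min_fix_spec : Claim_equal_min_fix := by
  intro s _
  show min_fix s = min_fix_alt s
  simp only [min_fix, min_fix_alt, maxFixA]
  cases hn : s.toList.length with
  | zero =>
    simp
  | succ m =>
    have hm1 : m + 1 - 1 = m := by omega
    rw [hm1, ← hn]
    obtain ⟨hAB, hInv⟩ := stage1 s.toList m (by omega)
    obtain ⟨hFlen, hRlen, hkF, hUn, hFb, hRb, hch, hrec⟩ := hInv
    set st := (List.range' 1 m).foldl (bStep s.toList)
      (List.replicate s.toList.length 0, List.replicate s.toList.length 0, 0) with hst
    have hFb' : ∀ t : Nat, 0 ≤ st.1.getD t 0 ∧ st.1.getD t 0 ≤ (t : Int) := by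
      intro t
      by_cases ht : t ≤ m
      · exact hFb t ht
      · rw [(hUn t (by omega)).1]; omega
    have hRb' : ∀ t : Nat, 0 ≤ st.2.1.getD t 0 ∧ st.2.1.getD t 0 ≤ st.1.getD t 0 := by
      intro t
      by_cases ht : t ≤ m
      · exact hRb t ht
      · rw [(hUn t (by omega)).1, (hUn t (by omega)).2]; omega
    have hch' : ∀ t : Nat, st.2.1.getD t 0 ≠ 0 → st.2.1.getD ((st.2.1.getD t 0).toNat - 1) 0 = 0 := by
      intro t hne
      by_cases ht : t ≤ m
      · exact hch t ht hne
      · exact absurd (hUn t (by omega)).2 hne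
    have hrec' : ∀ t : Nat, 1 ≤ t → t < m + 1 →
        (st.1.getD t 0 = 0 → st.2.1.getD t 0 = 0) ∧
        (st.1.getD t 0 ≠ 0 → st.2.1.getD t 0 =
          if st.2.1.getD ((st.1.getD t 0).toNat - 1) 0 ≠ 0 then
            st.2.1.getD ((st.1.getD t 0).toNat - 1) 0
          else st.1.getD t 0) :=
      fun t h1 h2 => hrec t h1 (by omega)
    obtain ⟨hlen2, hpt⟩ := stage2 (m + 1) st.1 st.2.1 (by rw [hFlen, hn]) (by rw [hRlen, hn])
      hFb' hRb' hch' hrec' m (by omega)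
    rw [hAB]
    apply List.ext_getElem (by rw [hlen2, hRlen, hn])
    intro idx hi1 hi2
    have h1 := hpt idx
    rw [if_pos (by rw [hlen2] at hi1; omega)] at h1
    rw [← List.getD_eq_getElem _ 0 hi1, ← List.getD_eq_getElem _ 0 hi2]
    exact h1
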